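-- pv_equiv track=rewrite | github.com/pskyvader/comfyui-image-scorer | shared/vectors/terms.py | tokenize_by_depth
-- ===== SOURCE A (Python) =====
-- def tokenize_by_depth(text: str, splitters: set[str]) -> list[str]:
--     """
--     Splits text by splitters and parenthetical boundaries, respecting nesting depth.
--     Ensures phrases stay together unless a splitter is encountered at the top level.
--     """
--     tokens: list[str] = []
--     current_chunk: list[str] = []
--     depth = 0
--     i = 0
--     length: int = len(text)
--
--     # Sort splitters to check longer word-based ones (like 'but') before characters
--     word_splitters: list[str] = sorted(
--         [s for s in splitters if s.isalnum()], key=len, reverse=True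
--     )
--
--     while i < length:
--         char: str = text[i]
--
--         if char == "(":
--             if depth == 0 and current_chunk:
--                 tokens.append("".join(current_chunk).strip())
--                 current_chunk = []
--             depth += 1
--             current_chunk.append(char)
--         elif char == ")":
--             depth -= 1
--             current_chunk.append(char)
--             if depth == 0:
--                 tokens.append("".join(current_chunk).strip())
--                 current_chunk = []
--         elif depth == 0:
--             found_splitter = False
--
--             # Check for non-alphanumeric splitters (like ',')
--             if char in splitters and not char.isalnum():
--                 tokens.append("".join(current_chunk).strip())
--                 current_chunk = []
--                 found_splitter = True
--
--             # Check for word-based splitters (like 'but') with boundary check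
--             elif char.isspace() or i == 0:
--                 lookahead: str = text[i:].strip()
--                 for ws in word_splitters:
--                     if lookahead.startswith(ws):
--                         # Verify it's a whole word, not part of another word
--                         end_idx: int = i + text[i:].find(ws) + len(ws)
--                         if end_idx == length or not text[end_idx].isalnum():
--                             tokens.append("".join(current_chunk).strip())
--                             current_chunk = []
--                             # Skip the length of the splitter word
--                             i += text[i:].find(ws) + len(ws) - 1
--                             found_splitter = True
--                             break
--
--             if not found_splitter:
--                 current_chunk.append(char)
--         else:
--             current_chunk.append(char)
--         i += 1
--
--     if current_chunk:
--         tokens.append("".join(current_chunk).strip())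
--
--     return [t for t in tokens if t]
-- ===== SOURCE B (Python) =====
-- def tokenize_by_depth(text: str, splitters: set[str]) -> list[str]:
--     """
--     Splits text by splitters and parenthetical boundaries, respecting nesting depth.
--     Single pass over the text: the current chunk is tracked as a slice [start:i),
--     and a word splitter is detected by scanning the alphanumeric run after the
--     whitespace at the cursor and testing it against a hash set (no re-slicing
--     of text[i:] and no iteration over the splitter list).
--     """
--     word_splitters = {s for s in splitters if s.isalnum()}
--     tokens: list[str] = []
--     depth = 0
--     start = 0
--     i = 0
--     n = len(text)
--     while i < n:
--         c = text[i]
--         if c == "(":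
--             if depth == 0 and start < i:
--                 tokens.append(text[start:i].strip())
--                 start = i
--             depth += 1
--             i += 1
--         elif c == ")":
--             depth -= 1
--             i += 1
--             if depth == 0:
--                 tokens.append(text[start:i].strip())
--                 start = i
--         elif depth == 0:
--             if c in splitters and not c.isalnum():
--                 tokens.append(text[start:i].strip())
--                 i += 1
--                 start = i
--             elif c.isspace() or i == 0:
--                 j = i
--                 while j < n and text[j].isspace():
--                     j += 1
--                 k = j
--                 while k < n and text[k].isalnum():
--                     k += 1
--                 if k > j and text[j:k] in word_splitters:
--                     tokens.append(text[start:i].strip())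
--                     i = k
--                     start = k
--                 else:
--                     i += 1
--             else:
--                 i += 1
--         else:
--             i += 1
--     if start < n:
--         tokens.append(text[start:n].strip())
--     return [t for t in tokens if t]
-- ===== Notes on version B (the rewrite author's own statement) =====
-- stated objective: alternative
-- what changed: Replaces A's per-position re-slicing (text[i:], .strip(), .find) and iteration over the sorted splitter list with a single pass that tracks the chunk as a slice [start:i) and detects a word splitter by scanning the alphanumeric run after the cursor's whitespace and testing it against a hash set.
import Mathlib
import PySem

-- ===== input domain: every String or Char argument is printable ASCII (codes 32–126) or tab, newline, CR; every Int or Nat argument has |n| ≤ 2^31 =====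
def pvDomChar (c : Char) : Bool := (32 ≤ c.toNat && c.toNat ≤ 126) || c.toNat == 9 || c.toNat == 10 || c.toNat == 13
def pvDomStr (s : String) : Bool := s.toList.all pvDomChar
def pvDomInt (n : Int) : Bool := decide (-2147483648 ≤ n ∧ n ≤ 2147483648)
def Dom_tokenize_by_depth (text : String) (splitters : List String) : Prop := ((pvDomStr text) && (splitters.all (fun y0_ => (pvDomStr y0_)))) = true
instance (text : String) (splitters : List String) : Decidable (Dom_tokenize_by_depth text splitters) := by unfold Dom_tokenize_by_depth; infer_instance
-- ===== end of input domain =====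

-- B replaces A's per-position re-slicing/re-searching (text[i:], strip, find, loop over the
-- sorted splitter list) by a single pass that keeps the chunk as a slice [start:i) and reads
-- off the alphanumeric run after the cursor's whitespace, testing it against a set
-- (an alternative algorithm of similar cost).
-- Strings are handled as their code-point lists (PySem.Chars); tokens are joined at the end.

-- ===== PORT A =====
-- sorted([s for s in splitters if s.isalnum()], key=len, reverse=True)
def pvWordSplittersA (spl : List (List Char)) : List (List Char) :=
  PySem.List.sorted (spl.filter (fun s => PySem.Chars.strIsalnum s)) (fun s => s.length) true

-- the inner 'for ws in word_splitters: … break' of A; returns end_idx (the value of i after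
-- the 'i += …' and the loop's 'i += 1') when a word splitter fires, none otherwise.
-- find ≥ 0 whenever startswith succeeded (ws is a prefix of the stripped tail), so .toNat is
-- exact there; the pyGetD default 'a' is only read when end_idx is out of range, which cannot
-- happen for a found occurrence (0 ≤ end_idx ≤ len).
def pvInnerA (cs : List Char) (i : Nat) : List (List Char) → Option Nat
  | [] => none
  | ws :: rest =>
    let tail := cs.drop i
    let lookahead := PySem.Chars.strip tail
    if PySem.Chars.startswith lookahead ws then
      let e : Nat := i + (PySem.Chars.find tail ws).toNat + ws.length
      if (e = cs.length) ∨ PySem.Chars.isalnum (PySem.List.pyGetD cs (e : Int) 'a') = false then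
        some e
      else pvInnerA cs i rest
    else pvInnerA cs i rest

-- termination helper for the jump 'i = end_idx' (word splitters are nonempty strings)
theorem pvInnerA_lt (cs : List Char) (i : Nat) (l : List (List Char))
    (hws : ∀ ws ∈ l, ws ≠ []) {e : Nat} (h : pvInnerA cs i l = some e) : i < e := by
  induction l with
  | nil => simp [pvInnerA] at h
  | cons ws rest ih =>
    have hne : ws ≠ [] := hws ws (by simp)
    have hlen : 0 < ws.length := List.length_pos_iff.mpr hne
    simp only [pvInnerA] at h
    split at h
    · split at h
      · cases h; omega
      · exact ih (fun w hw => hws w (by simp [hw])) h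
    · exact ih (fun w hw => hws w (by simp [hw])) h

-- the main 'while i < length' loop of A (tokens and chunk as code-point lists);
-- hws is a termination artifact: the word splitters passed in are nonempty (they pass isalnum)
def pvLoopA (cs : List Char) (spl : List (List Char)) (wspl : List (List Char))
    (hws : ∀ ws ∈ wspl, ws ≠ [])
    (tokens : List (List Char)) (chunk : List Char) (depth : Int) (i : Nat) : List (List Char) :=
  if h : i < cs.length then
    if cs[i] = '(' then
      if depth = 0 ∧ chunk ≠ [] then
        pvLoopA cs spl wspl hws (tokens ++ [PySem.Chars.strip chunk]) [cs[i]] (depth + 1) (i + 1)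
      else
        pvLoopA cs spl wspl hws tokens (chunk ++ [cs[i]]) (depth + 1) (i + 1)
    else if cs[i] = ')' then
      if depth - 1 = 0 then
        pvLoopA cs spl wspl hws (tokens ++ [PySem.Chars.strip (chunk ++ [cs[i]])]) [] (depth - 1) (i + 1)
      else
        pvLoopA cs spl wspl hws tokens (chunk ++ [cs[i]]) (depth - 1) (i + 1)
    else if depth = 0 then
      if spl.contains [cs[i]] && !(PySem.Chars.isalnum cs[i]) then
        pvLoopA cs spl wspl hws (tokens ++ [PySem.Chars.strip chunk]) [] depth (i + 1)
      else if PySem.Chars.isspace cs[i] || i == 0 then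
        match hm : pvInnerA cs i wspl with
        | some e => pvLoopA cs spl wspl hws (tokens ++ [PySem.Chars.strip chunk]) [] depth e
        | none => pvLoopA cs spl wspl hws tokens (chunk ++ [cs[i]]) depth (i + 1)
      else
        pvLoopA cs spl wspl hws tokens (chunk ++ [cs[i]]) depth (i + 1)
    else
      pvLoopA cs spl wspl hws tokens (chunk ++ [cs[i]]) depth (i + 1)
  else
    if chunk ≠ [] then tokens ++ [PySem.Chars.strip chunk] else tokens
termination_by cs.length - i
decreasing_by
  all_goals first
  | omega
  | (have := pvInnerA_lt cs i wspl hws hm; omega)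

-- word splitters that pass the isalnum filter are nonempty (cited by the port for termination)
theorem pvWordSplittersA_ne_nil (spl : List (List Char)) :
    ∀ ws ∈ pvWordSplittersA spl, ws ≠ [] := by
  intro ws hws
  rw [pvWordSplittersA, PySem.List.mem_sorted] at hws
  have := (List.mem_filter.mp hws).2
  simp only [PySem.Chars.strIsalnum, Bool.and_eq_true, Bool.not_eq_eq_eq_not, Bool.not_true,
    List.isEmpty_eq_false_iff] at this
  exact this.1

def tokenize_by_depth (text : String) (splitters : List String) : List String :=
  let cs := text.toList
  let spl := splitters.map String.toList
  let wspl := pvWordSplittersA spl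
  let tokens := pvLoopA cs spl wspl (pvWordSplittersA_ne_nil spl) [] [] 0 0
  (tokens.filter (fun t => !t.isEmpty)).map (fun t => String.ofList t)

-- ===== PORT B =====
-- 'while j < n and text[j].isspace(): j += 1'
def pvScanSpace (cs : List Char) (j : Nat) : Nat :=
  if h : j < cs.length then
    if PySem.Chars.isspace cs[j] then pvScanSpace cs (j + 1) else j
  else j
termination_by cs.length - j

-- 'while k < n and text[k].isalnum(): k += 1'
def pvScanAlnum (cs : List Char) (k : Nat) : Nat :=
  if h : k < cs.length then
    if PySem.Chars.isalnum cs[k] then pvScanAlnum cs (k + 1) else k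
  else k
termination_by cs.length - k

-- termination helper for the jump 'i = k' (cited by pvLoopB's decreasing_by)
theorem pvScanSpace_ge (cs : List Char) (j : Nat) : j ≤ pvScanSpace cs j := by
  fun_induction pvScanSpace cs j <;> omega


-- the single-pass loop of B: the pending chunk is the slice [start:i)
def pvLoopB (cs : List Char) (spl : List (List Char)) (wset : PySem.Set (List Char))
    (tokens : List (List Char)) (start : Nat) (depth : Int) (i : Nat) : List (List Char) :=
  if h : i < cs.length then
    if cs[i] = '(' then
      if depth = 0 ∧ start < i then
        pvLoopB cs spl wset
          (tokens ++ [PySem.Chars.strip (PySem.List.slice cs (some (start : Int)) (some (i : Int)))])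
          i (depth + 1) (i + 1)
      else pvLoopB cs spl wset tokens start (depth + 1) (i + 1)
    else if cs[i] = ')' then
      if depth - 1 = 0 then
        pvLoopB cs spl wset
          (tokens ++ [PySem.Chars.strip (PySem.List.slice cs (some (start : Int)) (some ((i : Int) + 1)))])
          (i + 1) (depth - 1) (i + 1)
      else pvLoopB cs spl wset tokens start (depth - 1) (i + 1)
    else if depth = 0 then
      if spl.contains [cs[i]] && !(PySem.Chars.isalnum cs[i]) then
        pvLoopB cs spl wset
          (tokens ++ [PySem.Chars.strip (PySem.List.slice cs (some (start : Int)) (some (i : Int)))])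
          (i + 1) depth (i + 1)
      else if PySem.Chars.isspace cs[i] || i == 0 then
        if hjk : pvScanSpace cs i < pvScanAlnum cs (pvScanSpace cs i) ∧
            PySem.List.slice cs (some ((pvScanSpace cs i : Nat) : Int))
              (some ((pvScanAlnum cs (pvScanSpace cs i) : Nat) : Int)) ∈ wset then
          pvLoopB cs spl wset
            (tokens ++ [PySem.Chars.strip (PySem.List.slice cs (some (start : Int)) (some (i : Int)))])
            (pvScanAlnum cs (pvScanSpace cs i)) depth (pvScanAlnum cs (pvScanSpace cs i))
        else pvLoopB cs spl wset tokens start depth (i + 1)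
      else pvLoopB cs spl wset tokens start depth (i + 1)
    else pvLoopB cs spl wset tokens start depth (i + 1)
  else
    if start < cs.length then
      tokens ++ [PySem.Chars.strip (PySem.List.slice cs (some (start : Int)) (some (cs.length : Int)))]
    else tokens
termination_by cs.length - i
decreasing_by
  all_goals first
  | omega
  | (have h1 : i ≤ pvScanSpace cs i := pvScanSpace_ge cs i
     omega)

def tokenize_by_depth_alt (text : String) (splitters : List String) : List String :=
  let cs := text.toList
  let spl := splitters.map String.toList
  let wset := PySem.Set.ofList (spl.filter (fun s => PySem.Chars.strIsalnum s))
  let tokens := pvLoopB cs spl wset [] 0 0 0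
  (tokens.filter (fun t => !t.isEmpty)).map (fun t => String.ofList t)

-- ===== PRECONDITION & SPEC =====
def Spec_tokenize_by_depth (text : String) (splitters : List String) (out : List String) : Prop := out = tokenize_by_depth_alt text splitters
instance (text : String) (splitters : List String) (out : List String) : Decidable (Spec_tokenize_by_depth text splitters out) := by unfold Spec_tokenize_by_depth; infer_instance

-- ===== CLAIM (what is proved, stated in full; the proofs are below) =====
def Claim_equal_tokenize_by_depth : Prop := ∀ (text : String) (splitters : List String), Dom_tokenize_by_depth text splitters → Spec_tokenize_by_depth text splitters (tokenize_by_depth text splitters)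

-- ===== LEMMAS AND PROOFS =====



theorem pvAlnumNotSpace : ∀ c : Char, PySem.Chars.isalnum c = true → PySem.Chars.isspace c = false := by
  intro c h
  have h' : (48 ≤ c.toNat ∧ c.toNat ≤ 57) ∨ (65 ≤ c.toNat ∧ c.toNat ≤ 90) ∨ (97 ≤ c.toNat ∧ c.toNat ≤ 122) := by
    simp only [PySem.Chars.isalnum, PySem.Chars.isalpha, PySem.Chars.isdigit, PySem.Chars.isupper,
      PySem.Chars.islower, Bool.or_eq_true, Bool.and_eq_true, decide_eq_true_eq] at h
    rcases h with (h|h)|h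
    · exact Or.inr (Or.inl ⟨Fin.mk_le_mk.mp h.1, Fin.mk_le_mk.mp h.2⟩)
    · exact Or.inr (Or.inr ⟨Fin.mk_le_mk.mp h.1, Fin.mk_le_mk.mp h.2⟩)
    · exact Or.inl ⟨Fin.mk_le_mk.mp h.1, Fin.mk_le_mk.mp h.2⟩
  simp only [PySem.Chars.isspace, Bool.or_eq_false_iff, Bool.and_eq_false_iff,
    decide_eq_false_iff_not]
  omega

theorem pvDropWhile_eq_drop (p : Char → Bool) (l : List Char) :
    l.dropWhile p = l.drop (l.takeWhile p).length := by
  conv_lhs => rw [show l.dropWhile p = (l.takeWhile p ++ l.dropWhile p).drop (l.takeWhile p).length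
    from (List.drop_left ..).symm]
  rw [List.takeWhile_append_dropWhile]

-- an all-p list that is a prefix is a prefix of the takeWhile
theorem pvPrefix_takeWhile (p : Char → Bool) (ws l : List Char)
    (hal : ws.all p) (h : ws <+: l) : ws <+: l.takeWhile p := by
  induction ws generalizing l with
  | nil => exact List.nil_prefix
  | cons a t ih =>
    obtain ⟨r, hr⟩ := h
    subst hr
    simp only [List.all_cons, Bool.and_eq_true] at hal
    rw [List.cons_append, List.takeWhile_cons_of_pos hal.1]
    exact List.cons_prefix_cons.mpr ⟨rfl, ih _ hal.2 (List.prefix_append t r)⟩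

theorem pvScanSpace_eq (cs : List Char) (i : Nat) :
    pvScanSpace cs i = i + ((cs.drop i).takeWhile PySem.Chars.isspace).length := by
  fun_induction pvScanSpace cs i with
  | case1 j h hsp ih =>
    rw [ih, List.drop_eq_getElem_cons h, List.takeWhile_cons_of_pos hsp]
    simp; omega
  | case2 j h hsp =>
    rw [List.drop_eq_getElem_cons h, List.takeWhile_cons_of_neg (by simpa using hsp)]
    simp
  | case3 j h =>
    rw [List.drop_eq_nil_of_le (by omega)]
    simp

theorem pvScanAlnum_eq (cs : List Char) (i : Nat) :
    pvScanAlnum cs i = i + ((cs.drop i).takeWhile PySem.Chars.isalnum).length := by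
  fun_induction pvScanAlnum cs i with
  | case1 j h hsp ih =>
    rw [ih, List.drop_eq_getElem_cons h, List.takeWhile_cons_of_pos hsp]
    simp; omega
  | case2 j h hsp =>
    rw [List.drop_eq_getElem_cons h, List.takeWhile_cons_of_neg (by simpa using hsp)]
    simp
  | case3 j h =>
    rw [List.drop_eq_nil_of_le (by omega)]
    simp

-- a nonempty alnum prefix of d ++ (all-space w) is a prefix of d
theorem pvPrefix_append_spaces (d w ws : List Char) (hw : w.all PySem.Chars.isspace)
    (hal : ws.all PySem.Chars.isalnum) (h : ws <+: d ++ w) : ws <+: d := by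
  by_cases hlen : ws.length <= d.length
  · have ht : (d ++ w).take d.length = d := List.take_left ..
    rw [← ht]
    exact List.prefix_take_iff.mpr ⟨h, hlen⟩
  · exfalso
    push_neg at hlen
    have hwl : ws.length <= d.length + w.length := by
      have := h.length_le
      simpa using this
    have h0 : 0 < w.length := by omega
    have h1 : ws[d.length]'(by omega) = (d ++ w)[d.length]'(by simp; omega) :=
      h.getElem (by omega)
    have h2 : (d ++ w)[d.length]'(by simp; omega) = w[0]'h0 := by
      rw [List.getElem_append_right (by omega)]
      simp
    have hsp : PySem.Chars.isspace (w[0]'h0) = true := by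
      rw [List.all_eq_true] at hw
      exact hw _ (List.getElem_mem _)
    have halm : PySem.Chars.isalnum (ws[d.length]'(by omega)) = true := by
      rw [List.all_eq_true] at hal
      exact hal _ (List.getElem_mem _)
    rw [h1, h2] at halm
    rw [pvAlnumNotSpace _ halm] at hsp
    exact Bool.false_ne_true hsp

-- stripping the tail does not affect whether an alphanumeric word is its prefix
theorem pvStartswithStrip (t ws : List Char)
    (hal : ws.all PySem.Chars.isalnum) :
    (PySem.Chars.startswith (PySem.Chars.strip t) ws = true) ↔
      ws <+: t.dropWhile PySem.Chars.isspace := by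
  rw [PySem.Chars.startswith_iff]
  have hdecomp : t.dropWhile PySem.Chars.isspace =
      ((t.dropWhile PySem.Chars.isspace).reverse.dropWhile PySem.Chars.isspace).reverse
      ++ ((t.dropWhile PySem.Chars.isspace).reverse.takeWhile PySem.Chars.isspace).reverse := by
    rw [← List.reverse_append, List.takeWhile_append_dropWhile, List.reverse_reverse]
  have hstrip : PySem.Chars.strip t =
      ((t.dropWhile PySem.Chars.isspace).reverse.dropWhile PySem.Chars.isspace).reverse := by
    simp [PySem.Chars.strip, PySem.Chars.lstrip, PySem.Chars.rstrip]
  rw [hstrip]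
  constructor
  · intro h
    exact h.trans ⟨_, hdecomp.symm⟩
  · intro h
    refine pvPrefix_append_spaces _ _ _ ?_ hal (hdecomp ▸ h)
    have := List.all_takeWhile (p := PySem.Chars.isspace)
      (l := (t.dropWhile PySem.Chars.isspace).reverse)
    simpa using this

-- text[i:].find(ws) lands exactly past the leading whitespace
theorem pvFindEq (t ws : List Char) (hne : ws ≠ []) (hal : ws.all PySem.Chars.isalnum)
    (hpre : ws <+: t.dropWhile PySem.Chars.isspace) :
    PySem.Chars.find t ws = ((t.takeWhile PySem.Chars.isspace).length : Int) := by
  have hdw : t.dropWhile PySem.Chars.isspace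
      = t.drop (t.takeWhile PySem.Chars.isspace).length := pvDropWhile_eq_drop _ _
  have hinfix : 0 ≤ PySem.Chars.find t ws := by
    rw [PySem.Chars.find_nonneg_iff, ← PySem.Chars.isIn_iff_infix,
      ← PySem.Chars.exists_prefix_drop_iff_isIn]
    exact ⟨_, hdw ▸ hpre⟩
  obtain ⟨hat, hmin⟩ := PySem.Chars.find_spec hinfix
  have hle : (PySem.Chars.find t ws).toNat ≤ (t.takeWhile PySem.Chars.isspace).length := by
    by_contra hgt
    exact hmin _ (by omega) (hdw ▸ hpre)
  have hge : (t.takeWhile PySem.Chars.isspace).length ≤ (PySem.Chars.find t ws).toNat := by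
    by_contra hgt
    push_neg at hgt
    obtain ⟨a, ws', rfl⟩ := List.exists_cons_of_ne_nil hne
    obtain ⟨r, hr⟩ := hat
    have hf : (PySem.Chars.find t (a :: ws')).toNat < t.length := by
      have : (t.drop (PySem.Chars.find t (a :: ws')).toNat).length = (a :: ws' ++ r).length := by rw [hr]
      simp at this
      omega
    rw [List.drop_eq_getElem_cons hf] at hr
    have ha : t[(PySem.Chars.find t (a :: ws')).toNat] = a := by
      exact (List.head_eq_of_cons_eq hr).symm
    have hsp : PySem.Chars.isspace (t[(PySem.Chars.find t (a :: ws')).toNat]'hf) = true := by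
      have hpl : (t.takeWhile PySem.Chars.isspace).length ≤ t.length :=
        (List.takeWhile_prefix _).length_le
      have hgp := (List.takeWhile_prefix (p := PySem.Chars.isspace) (l := t)).getElem
        (i := (PySem.Chars.find t (a :: ws')).toNat) (by omega)
      have hall := List.all_takeWhile (p := PySem.Chars.isspace) (l := t)
      rw [List.all_eq_true] at hall
      exact hall _ (hgp ▸ List.getElem_mem _)
    have halm : PySem.Chars.isalnum a = true := by
      simp [List.all_cons] at hal
      exact hal.1
    rw [ha, pvAlnumNotSpace _ halm] at hsp
    exact Bool.false_ne_true hsp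
  omega

-- the character right after a maximal p-run fails p
theorem pvTakeWhileBoundary (p : Char → Bool) (l : List Char) (n : Nat)
    (hn : n = (l.takeWhile p).length) (h : n < l.length) :
    p (l[n]'h) = false := by
  induction l generalizing n with
  | nil => simp at h
  | cons a t ih =>
    by_cases hp : p a
    · rw [List.takeWhile_cons_of_pos hp] at hn
      match n, hn with
      | n + 1, hn =>
        rw [List.getElem_cons_succ]
        exact ih n (by simpa using hn) (by simpa using h)
    · rw [List.takeWhile_cons_of_neg (by simpa using hp)] at hn
      subst hn
      simpa using hp

def pvPad (cs : List Char) (i : Nat) : Nat :=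
  ((cs.drop i).takeWhile PySem.Chars.isspace).length

def pvRun (cs : List Char) (i : Nat) : List Char :=
  (cs.drop (i + pvPad cs i)).takeWhile PySem.Chars.isalnum

-- A's inner loop over the word splitters fires exactly when the alphanumeric run
-- after the cursor's whitespace is one of them, and jumps to the end of that run
theorem pvInnerA_eq (cs : List Char) (i : Nat) (l : List (List Char))
    (hl : ∀ ws ∈ l, ws ≠ [] ∧ ws.all PySem.Chars.isalnum) :
    pvInnerA cs i l =
      if pvRun cs i ≠ [] ∧ pvRun cs i ∈ l then
        some (i + pvPad cs i + (pvRun cs i).length)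
      else none := by
  have hu : (cs.drop i).dropWhile PySem.Chars.isspace = cs.drop (i + pvPad cs i) := by
    rw [pvDropWhile_eq_drop, List.drop_drop]
    simp only [pvPad, Nat.add_comm]
  have hrunpre : pvRun cs i <+: cs.drop (i + pvPad cs i) := List.takeWhile_prefix _
  have hrunall : (pvRun cs i).all PySem.Chars.isalnum := List.all_takeWhile
  induction l with
  | nil => simp [pvInnerA]
  | cons ws rest ih =>
    obtain ⟨hne, hal⟩ := hl ws (by simp)
    have ihr := ih (fun w hw => hl w (by simp [hw]))
    simp only [pvInnerA]
    by_cases hsw : PySem.Chars.startswith (PySem.Chars.strip (cs.drop i)) ws = true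
    · rw [if_pos hsw]
      have hpre : ws <+: cs.drop (i + pvPad cs i) := by
        rw [← hu]
        exact (pvStartswithStrip _ _ hal).mp hsw
      have hfind : PySem.Chars.find (cs.drop i) ws = ((pvPad cs i : Nat) : Int) := by
        rw [pvFindEq _ _ hne hal (hu ▸ hpre)]
        rfl
      have hwr : ws <+: pvRun cs i := pvPrefix_takeWhile _ _ _ hal hpre
      have hwlen : ws.length ≤ (pvRun cs i).length := hwr.length_le
      have hjlt : i + pvPad cs i < cs.length := by
        have h1 : cs.drop (i + pvPad cs i) ≠ [] := by
          intro h0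
          rw [h0] at hpre
          exact hne (List.prefix_nil.mp hpre)
        by_contra hc
        push_neg at hc
        exact h1 (List.drop_eq_nil_of_le (by omega))
      have hrunlen : (pvRun cs i).length ≤ cs.length - (i + pvPad cs i) := by
        have := hrunpre.length_le
        simpa using this
      have hfe : i + (PySem.Chars.find (cs.drop i) ws).toNat + ws.length
          = i + pvPad cs i + ws.length := by
        rw [hfind]; simp
      by_cases hlen : ws.length = (pvRun cs i).length
      · -- ws is the whole run: the boundary check passes
        have hwseq : ws = pvRun cs i := hwr.eq_of_length hlen
        have hrne : pvRun cs i ≠ [] := by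
          rw [← hwseq]; exact hne
        have hbd : (i + (PySem.Chars.find (cs.drop i) ws).toNat + ws.length = cs.length) ∨
            PySem.Chars.isalnum (PySem.List.pyGetD cs
              ((i + (PySem.Chars.find (cs.drop i) ws).toNat + ws.length : Nat) : Int) 'a') = false := by
          rw [hfe]
          by_cases hend : i + pvPad cs i + ws.length = cs.length
          · exact Or.inl hend
          · refine Or.inr ?_
            have helt : i + pvPad cs i + ws.length < cs.length := by omega
            rw [PySem.List.pyGetD_natCast, List.getD_eq_getElem?_getD,
              List.getElem?_eq_getElem helt]
            simp only [Option.getD_some]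
            have hlt2 : (pvRun cs i).length < (cs.drop (i + pvPad cs i)).length := by
              simp
              omega
            have hb := pvTakeWhileBoundary PySem.Chars.isalnum (cs.drop (i + pvPad cs i))
              (pvRun cs i).length rfl hlt2
            have h1 : (cs.drop (i + pvPad cs i))[(pvRun cs i).length]'hlt2
                = cs[i + pvPad cs i + ws.length]'helt := by
              rw [List.getElem_drop]
              congr 1
              omega
            rw [← h1]
            exact hb
        rw [if_pos hbd, if_pos ⟨hrne, by rw [← hwseq]; exact List.mem_cons_self ..⟩, hfe, hwseq]
      · -- ws is a proper prefix of the run: the next char is alphanumeric, no split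
        have hlt : ws.length < (pvRun cs i).length := by omega
        have helt : i + pvPad cs i + ws.length < cs.length := by omega
        have hbd : ¬ ((i + (PySem.Chars.find (cs.drop i) ws).toNat + ws.length = cs.length) ∨
            PySem.Chars.isalnum (PySem.List.pyGetD cs
              ((i + (PySem.Chars.find (cs.drop i) ws).toNat + ws.length : Nat) : Int) 'a') = false) := by
          rw [hfe]
          push_neg
          refine ⟨by omega, ?_⟩
          rw [PySem.List.pyGetD_natCast, List.getD_eq_getElem?_getD,
            List.getElem?_eq_getElem helt]
          simp only [Option.getD_some, Bool.not_eq_false]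
          have h1 : cs[i + pvPad cs i + ws.length]'helt
              = (cs.drop (i + pvPad cs i))[ws.length]'(by simp; omega) := by
            rw [List.getElem_drop]
          have h2 : (cs.drop (i + pvPad cs i))[ws.length]'(by simp; omega)
              = (pvRun cs i)[ws.length]'hlt := (hrunpre.getElem hlt).symm
          rw [h1, h2]
          rw [List.all_eq_true] at hrunall
          exact hrunall _ (List.getElem_mem _)
        rw [if_neg hbd, ihr]
        have hner : pvRun cs i ≠ ws := by
          intro h0
          rw [← h0] at hwlen hlt
          omega
        by_cases hmem : pvRun cs i ≠ [] ∧ pvRun cs i ∈ rest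
        · rw [if_pos hmem, if_pos ⟨hmem.1, List.mem_cons_of_mem _ hmem.2⟩]
        · rw [if_neg hmem]
          rw [if_neg (by
            intro hc
            rcases List.mem_cons.mp hc.2 with h0 | h0
            · exact hner h0
            · exact hmem ⟨hc.1, h0⟩)]
    · rw [if_neg hsw, ihr]
      by_cases hrne : pvRun cs i ≠ []
      · have hner : pvRun cs i ≠ ws := by
          intro h0
          apply hsw
          rw [h0] at hrne hrunall hrunpre
          exact (pvStartswithStrip _ _ hrunall).mpr (hu ▸ hrunpre)
        by_cases hmem : pvRun cs i ∈ rest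
        · rw [if_pos ⟨hrne, hmem⟩, if_pos ⟨hrne, List.mem_cons_of_mem _ hmem⟩]
        · rw [if_neg (by intro hc; exact hmem hc.2)]
          rw [if_neg (by
            intro hc
            rcases List.mem_cons.mp hc.2 with h0 | h0
            · exact hner h0
            · exact hmem h0)]
      · rw [if_neg (by intro hc; exact hrne hc.1), if_neg (by intro hc; exact hrne hc.1)]

-- the pending chunk of A is the slice text[start:i)
theorem pvChunkSnoc (cs : List Char) (start i : Nat) (hs : start ≤ i) (hi : i < cs.length) :
    (cs.drop start).take (i - start) ++ [cs[i]'hi] = (cs.drop start).take (i + 1 - start) := by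
  rw [show i + 1 - start = (i - start) + 1 by omega, List.take_add_one]
  congr 1
  have h1 : (cs.drop start)[i - start]? = some (cs[i]'hi) := by
    rw [List.getElem?_drop, show start + (i - start) = i by omega,
      List.getElem?_eq_getElem hi]
  rw [h1]
  rfl

theorem pvChunkNeNil (cs : List Char) (start i : Nat) (hs : start ≤ i) (hi : i ≤ cs.length) :
    ((cs.drop start).take (i - start) ≠ []) ↔ start < i := by
  rw [← List.length_pos_iff]
  simp
  omega

theorem pvChunkSingleton (cs : List Char) (i : Nat) (hi : i < cs.length) :
    (cs.drop i).take (i + 1 - i) = [cs[i]'hi] := by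
  rw [show i + 1 - i = 1 by omega, List.drop_eq_getElem_cons hi]
  rfl

-- the elements of A's sorted word-splitter list are the nonempty all-alnum splitters
theorem pvWordSplittersA_mem (spl : List (List Char)) (w : List Char) :
    w ∈ pvWordSplittersA spl ↔ w ∈ spl ∧ w ≠ [] ∧ w.all PySem.Chars.isalnum := by
  rw [pvWordSplittersA, PySem.List.mem_sorted, List.mem_filter]
  simp only [PySem.Chars.strIsalnum, Bool.and_eq_true, Bool.not_eq_eq_eq_not, Bool.not_true,
    List.isEmpty_eq_false_iff]

theorem pvWordSplittersA_good (spl : List (List Char)) :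
    ∀ ws ∈ pvWordSplittersA spl, ws ≠ [] ∧ ws.all PySem.Chars.isalnum := by
  intro ws h
  exact ((pvWordSplittersA_mem spl ws).mp h).2

theorem pvLoop_eq (cs : List Char) (spl : List (List Char)) :
    ∀ (fuel i : Nat) (tokens : List (List Char)) (start : Nat) (depth : Int),
    cs.length - i ≤ fuel → start ≤ i → i ≤ cs.length →
    pvLoopA cs spl (pvWordSplittersA spl) (pvWordSplittersA_ne_nil spl) tokens
        ((cs.drop start).take (i - start)) depth i
      = pvLoopB cs spl (PySem.Set.ofList (spl.filter (fun s => PySem.Chars.strIsalnum s)))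
        tokens start depth i := by
  intro fuel
  induction fuel with
  | zero =>
    intro i tokens start depth hf hs hi
    have hieq : i = cs.length := by omega
    rw [pvLoopA, pvLoopB]
    rw [dif_neg (by omega), dif_neg (by omega)]
    rw [PySem.List.slice_natCast]
    by_cases hlt : start < i
    · rw [if_pos ((pvChunkNeNil cs start i hs hi).mpr hlt), if_pos (by omega), hieq]
    · rw [if_neg (by rw [pvChunkNeNil cs start i hs hi]; omega), if_neg (by omega)]
  | succ fuel ih =>
    intro i tokens start depth hf hs hi
    rw [pvLoopA, pvLoopB]
    by_cases h : i < cs.length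
    · rw [dif_pos h, dif_pos h]
      have hil : i ≤ cs.length := by omega
      have hsnoc := pvChunkSnoc cs start i hs h
      by_cases hpar : cs[i] = '('
      · rw [if_pos hpar, if_pos hpar]
        by_cases hflush : depth = 0 ∧ start < i
        · rw [if_pos ⟨hflush.1, (pvChunkNeNil cs start i hs hil).mpr hflush.2⟩, if_pos hflush,
            PySem.List.slice_natCast]
          have h2 := ih (i + 1) (tokens ++ [PySem.Chars.strip ((cs.drop start).take (i - start))])
            i (depth + 1) (by omega) (by omega) (by omega)
          rw [pvChunkSingleton cs i h] at h2
          exact h2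
        · rw [if_neg (fun hc => hflush ⟨hc.1, (pvChunkNeNil cs start i hs hil).mp hc.2⟩),
            if_neg hflush]
          have h2 := ih (i + 1) tokens start (depth + 1) (by omega) (by omega) (by omega)
          rw [← hsnoc] at h2
          exact h2
      · rw [if_neg hpar, if_neg hpar]
        by_cases hrp : cs[i] = ')'
        · rw [if_pos hrp, if_pos hrp]
          by_cases hd0 : depth - 1 = 0
          · rw [if_pos hd0, if_pos hd0,
              show ((i : Int) + 1) = (((i + 1 : Nat) : Nat) : Int) by push_cast; ring,
              PySem.List.slice_natCast]
            have h2 := ih (i + 1)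
              (tokens ++ [PySem.Chars.strip ((cs.drop start).take (i + 1 - start))])
              (i + 1) (depth - 1) (by omega) (by omega) (by omega)
            simp only [Nat.sub_self, List.take_zero] at h2
            rw [hsnoc]
            exact h2
          · rw [if_neg hd0, if_neg hd0]
            have h2 := ih (i + 1) tokens start (depth - 1) (by omega) (by omega) (by omega)
            rw [← hsnoc] at h2
            exact h2
        · rw [if_neg hrp, if_neg hrp]
          by_cases hdz : depth = 0
          · rw [if_pos hdz, if_pos hdz]
            by_cases hcsp : (spl.contains [cs[i]] && !(PySem.Chars.isalnum cs[i])) = true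
            · rw [if_pos hcsp, if_pos hcsp, PySem.List.slice_natCast]
              have h2 := ih (i + 1)
                (tokens ++ [PySem.Chars.strip ((cs.drop start).take (i - start))])
                (i + 1) depth (by omega) (by omega) (by omega)
              simp only [Nat.sub_self, List.take_zero] at h2
              exact h2
            · rw [if_neg hcsp, if_neg hcsp]
              by_cases hspz : (PySem.Chars.isspace cs[i] || i == 0) = true
              · rw [if_pos hspz, if_pos hspz]
                -- the word-splitter branch
                have hIA := pvInnerA_eq cs i (pvWordSplittersA spl) (pvWordSplittersA_good spl)
                have hj : pvScanSpace cs i = i + pvPad cs i := pvScanSpace_eq cs i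
                have hk : pvScanAlnum cs (i + pvPad cs i)
                    = i + pvPad cs i + (pvRun cs i).length := pvScanAlnum_eq cs (i + pvPad cs i)
                have hpadle : pvPad cs i ≤ cs.length - i := by
                  have := (List.takeWhile_prefix
                    (p := PySem.Chars.isspace) (l := cs.drop i)).length_le
                  simpa using this
                have hrunle : (pvRun cs i).length ≤ cs.length - (i + pvPad cs i) := by
                  have := (List.takeWhile_prefix
                    (p := PySem.Chars.isalnum) (l := cs.drop (i + pvPad cs i))).length_le
                  simpa using this
                have hslice : PySem.List.slice cs (some ((pvScanSpace cs i : Nat) : Int))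
                    (some ((pvScanAlnum cs (pvScanSpace cs i) : Nat) : Int)) = pvRun cs i := by
                  rw [hj, hk, PySem.List.slice_natCast,
                    show i + pvPad cs i + (pvRun cs i).length - (i + pvPad cs i)
                      = (pvRun cs i).length by omega]
                  exact (List.prefix_iff_eq_take.mp (List.takeWhile_prefix _)).symm
                have hrunall : (pvRun cs i).all PySem.Chars.isalnum := List.all_takeWhile
                have hPQ : (pvRun cs i ≠ [] ∧ pvRun cs i ∈ pvWordSplittersA spl) ↔
                    (pvScanSpace cs i < pvScanAlnum cs (pvScanSpace cs i) ∧
                      PySem.List.slice cs (some ((pvScanSpace cs i : Nat) : Int))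
                        (some ((pvScanAlnum cs (pvScanSpace cs i) : Nat) : Int))
                        ∈ PySem.Set.ofList (spl.filter (fun s => PySem.Chars.strIsalnum s))) := by
                  rw [hslice, PySem.Set.mem_ofList, List.mem_filter, pvWordSplittersA_mem, hj, hk]
                  constructor
                  · rintro ⟨hrne, hmem, -, -⟩
                    refine ⟨by have := List.length_pos_iff.mpr hrne; omega, hmem, ?_⟩
                    simp [PySem.Chars.strIsalnum, hrne, hrunall]
                  · rintro ⟨hlt, hmem, hsia⟩
                    have hrne : pvRun cs i ≠ [] := by
                      intro h0
                      rw [h0] at hlt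
                      simp at hlt
                    exact ⟨hrne, hmem, hrne, hrunall⟩
                split
                · -- pvInnerA returned some e
                  rename_i e heq
                  rw [hIA] at heq
                  by_cases hP : pvRun cs i ≠ [] ∧ pvRun cs i ∈ pvWordSplittersA spl
                  · rw [if_pos hP] at heq
                    have he : e = i + pvPad cs i + (pvRun cs i).length :=
                      (Option.some_injective _ heq).symm
                    rw [dif_pos (hPQ.mp hP), PySem.List.slice_natCast]
                    have hrpos : 0 < (pvRun cs i).length := List.length_pos_iff.mpr hP.1
                    have h2 := ih (i + pvPad cs i + (pvRun cs i).length)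
                      (tokens ++ [PySem.Chars.strip ((cs.drop start).take (i - start))])
                      (i + pvPad cs i + (pvRun cs i).length) depth
                      (by omega) (by omega) (by omega)
                    simp only [Nat.sub_self, List.take_zero] at h2
                    rw [he, hj, hk]
                    exact h2
                  · rw [if_neg hP] at heq
                    simp at heq
                · -- pvInnerA returned none
                  rename_i heq
                  rw [hIA] at heq
                  by_cases hP : pvRun cs i ≠ [] ∧ pvRun cs i ∈ pvWordSplittersA spl
                  · rw [if_pos hP] at heq
                    simp at heq
                  · rw [dif_neg (fun hq => hP (hPQ.mpr hq))]
                    have h2 := ih (i + 1) tokens start depth (by omega) (by omega) (by omega)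
                    rw [← hsnoc] at h2
                    exact h2
              · rw [if_neg hspz, if_neg hspz]
                have h2 := ih (i + 1) tokens start depth (by omega) (by omega) (by omega)
                rw [← hsnoc] at h2
                exact h2
          · rw [if_neg hdz, if_neg hdz]
            have h2 := ih (i + 1) tokens start depth (by omega) (by omega) (by omega)
            rw [← hsnoc] at h2
            exact h2
    · rw [dif_neg h, dif_neg h]
      rw [PySem.List.slice_natCast]
      have hieq : i = cs.length := by omega
      by_cases hlt : start < i
      · rw [if_pos ((pvChunkNeNil cs start i hs hi).mpr hlt), if_pos (by omega), hieq]
      · rw [if_neg (by rw [pvChunkNeNil cs start i hs hi]; omega), if_neg (by omega)]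

theorem pvTok_eq (text : String) (splitters : List String) :
    tokenize_by_depth text splitters = tokenize_by_depth_alt text splitters := by
  simp only [tokenize_by_depth, tokenize_by_depth_alt]
  have h := pvLoop_eq text.toList (splitters.map String.toList) text.toList.length
    0 [] 0 0 (by omega) (by omega) (by omega)
  simp only [Nat.sub_self, List.take_zero] at h
  rw [h]

-- ===== VERDICT (by name: the statement is the Claim_ definition above) =====
theorem tokenize_by_depth_spec : Claim_equal_tokenize_by_depth := by
  intro text splitters _
  show tokenize_by_depth text splitters = tokenize_by_depth_alt text splitters
  exact pvTok_eq text splitters
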